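-- pv_equiv track=rewrite | github.com/r09458005/NTU_course | hw3073.py | return2num
-- ===== SOURCE A (Python) =====
-- def return2num(n=0):
--     a1 = 1
--     a2 = 0
--     if n ==0:
--         a1 = 1
--         a2 = 0
--     elif n >0:
--         for i in range(n):
--             a1 *= (i+1)
--             a2 += (i+1)
--     return (a1,a2)
-- ===== SOURCE B (Python) =====
-- import math
--
-- def return2num(n=0):
--     if n > 0:
--         return (math.factorial(n), n * (n + 1) // 2)
--     return (1, 0)
-- ===== Notes on version B (the rewrite author's own statement) =====
-- stated objective: simpler
-- what changed: Replaces the accumulating loop with direct computation: the library factorial for the product and the triangular-number closed form for the sum.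
import Mathlib
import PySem

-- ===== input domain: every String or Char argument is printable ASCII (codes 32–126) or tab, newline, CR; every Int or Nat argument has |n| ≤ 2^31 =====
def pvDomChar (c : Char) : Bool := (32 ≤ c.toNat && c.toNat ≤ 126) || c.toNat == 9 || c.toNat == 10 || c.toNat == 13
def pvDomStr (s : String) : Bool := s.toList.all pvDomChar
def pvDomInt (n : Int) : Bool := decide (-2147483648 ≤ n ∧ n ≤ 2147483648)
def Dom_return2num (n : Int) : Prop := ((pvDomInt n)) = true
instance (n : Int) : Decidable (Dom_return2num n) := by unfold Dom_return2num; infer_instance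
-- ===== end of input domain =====

-- B replaces A's accumulating loop with the library factorial and the triangular-number closed form (simpler).

-- ===== PORT A =====
def return2num (n : Int) : Int × Int :=
  let a1 : Int := 1
  let a2 : Int := 0
  if n = 0 then (1, 0)
  else if n > 0 then
    (PySem.List.pyRange 0 n 1).foldl
      (fun (s : Int × Int) i => (s.1 * (i + 1), s.2 + (i + 1))) (a1, a2)
  else (a1, a2)

-- ===== PORT B =====
def return2num_alt (n : Int) : Int × Int :=
  if n > 0 then ((Nat.factorial n.toNat : Int), PySem.Int.floordiv (n * (n + 1)) 2)
  else (1, 0)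

-- ===== PRECONDITION & SPEC =====
def Spec_return2num (n : Int) (out : Int × Int) : Prop := out = return2num_alt n
instance (n : Int) (out : Int × Int) : Decidable (Spec_return2num n out) := by unfold Spec_return2num; infer_instance

-- ===== CLAIM (what is proved, stated in full; the proofs are below) =====
def Claim_equal_return2num : Prop := ∀ (n : Int), Dom_return2num n → Spec_return2num n (return2num n)

-- ===== LEMMAS AND PROOFS =====
lemma pv_loop (m : Nat) :
    (PySem.List.pyRange 0 (m : Int) 1).foldl
      (fun (s : Int × Int) i => (s.1 * (i + 1), s.2 + (i + 1))) (1, 0)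
    = ((Nat.factorial m : Int), ((m : Int) * ((m : Int) + 1)) / 2) := by
  induction m with
  | zero => simp [PySem.List.pyRange_one_eq_nil]
  | succ k ih =>
    rw [show ((k + 1 : Nat) : Int) = (k : Int) + 1 by push_cast; ring,
      PySem.List.pyRange_one_succ_right (by positivity), List.foldl_append, ih]
    simp only [List.foldl_cons, List.foldl_nil, Nat.factorial_succ, Prod.mk.injEq]
    refine ⟨?_, ?_⟩
    · push_cast; ring
    · have h : ∀ j : Int, j * (j + 1) / 2 + (j + 1) = (j + 1) * (j + 1 + 1) / 2 := by
        intro j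
        rw [show (j + 1) * (j + 1 + 1) = j * (j + 1) + (j + 1) * 2 by ring,
          Int.add_mul_ediv_right _ _ (by norm_num : (2 : Int) ≠ 0)]
      simpa using h (k : Int)

-- ===== VERDICT (by name: the statement is the Claim_ definition above) =====
theorem return2num_spec : Claim_equal_return2num := by
  intro n _
  unfold Spec_return2num return2num return2num_alt
  by_cases h0 : n = 0
  · simp [h0]
  · by_cases hp : n > 0
    · simp only [h0, hp, if_true, if_false]
      have hn : n = (n.toNat : Int) := by omega
      rw [hn, pv_loop]
      simp only [Int.toNat_natCast, Prod.mk.injEq, PySem.Int.floordiv]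
      exact ⟨trivial, (Int.fdiv_eq_ediv_of_nonneg _ (by positivity)).symm⟩
    · simp [h0, hp]
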